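-- pv_equiv track=rewrite | github.com/anirban314/coursework | Algorithms/grade3x.py | add_products
-- ===== SOURCE A (Python) =====
-- def add_products(products):
-- 	"""Takes a list of lists of partial products and adds them up
-- 	to yield the final product as a list of integers"""
--
-- 	flipped_pps = [pp[::-1] for pp in products]
-- 	answer = []
-- 	carry = 0
-- 	for digits in zip(*flipped_pps):
-- 		sum = 0 + carry
-- 		for d in digits:
-- 			sum += d
-- 		sum, carry = sum % 10, sum // 10
-- 		answer.insert(0,sum)
-- 	answer.insert(0,carry)
-- 	return answer
-- ===== SOURCE B (Python) =====
-- def add_products(products):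
--     """Takes a list of lists of partial products and adds them up
--     to yield the final product as a list of integers"""
--     cols = list(zip(*[pp[::-1] for pp in products]))
--     n = len(cols)
--     v = 0
--     for col in reversed(cols):
--         v = v * 10 + sum(col)
--     return [v // 10 ** n] + [(v // 10 ** i) % 10 for i in reversed(range(n))]
-- ===== Notes on version B (the rewrite author's own statement) =====
-- stated objective: alternative
-- what changed: A propagates the carry through one fused loop that re-sums each zipped column and pushes a digit per step; B instead evaluates the whole partial-product total as a single integer by a Horner pass over the columns and then reads every output digit off that value with closed-form floor-division and mod, so no carry state is threaded at all.
import Mathlib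
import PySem

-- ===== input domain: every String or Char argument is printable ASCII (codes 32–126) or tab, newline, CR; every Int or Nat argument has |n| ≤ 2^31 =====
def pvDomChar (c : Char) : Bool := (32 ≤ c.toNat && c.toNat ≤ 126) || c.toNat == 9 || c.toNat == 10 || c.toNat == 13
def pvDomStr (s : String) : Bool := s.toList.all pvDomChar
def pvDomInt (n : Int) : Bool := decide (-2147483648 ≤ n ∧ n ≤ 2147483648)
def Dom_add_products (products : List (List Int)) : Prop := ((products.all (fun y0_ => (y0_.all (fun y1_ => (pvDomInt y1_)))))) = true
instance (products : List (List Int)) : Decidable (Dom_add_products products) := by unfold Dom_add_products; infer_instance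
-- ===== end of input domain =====

-- B replaces A's fused sum-and-carry loop by a closed form: it evaluates the total value of the
-- partial products as one integer (Horner) and reads each output digit off by floor-division;
-- objective: alternative (a genuinely different algorithm, similar cost).

-- shared helper: exact port of Python's zip(*ls) for lists of Int lists
-- (truncates to the shortest list; the getD default 0 is never reached since i < every length)
def zipStar (ls : List (List Int)) : List (List Int) :=
  match ls with
  | [] => []
  | l :: rest =>
    let n := rest.foldl (fun m xs => min m xs.length) l.length
    (List.range n).map (fun i => (l :: rest).map (fun xs => xs.getD i 0))

-- ===== PORT A =====
def add_products (products : List (List Int)) : List Int :=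
  let flipped_pps := products.map (fun pp => pp.reverse)   -- pp[::-1]
  let st := (zipStar flipped_pps).foldl
    (fun (st : List Int × Int) digits =>
      let s := digits.foldl (fun acc d => acc + d) (0 + st.2)
      (PySem.Int.mod s 10 :: st.1, PySem.Int.floordiv s 10))
    ([], 0)
  st.2 :: st.1

-- ===== PORT B =====
def add_products_alt (products : List (List Int)) : List Int :=
  let cols := zipStar (products.map (fun pp => pp.reverse))
  let n := cols.length
  let v := cols.reverse.foldl (fun acc col => acc * 10 + col.sum) 0
  PySem.Int.floordiv v (10 ^ n) ::
    (List.range n).reverse.map (fun i => PySem.Int.mod (PySem.Int.floordiv v (10 ^ i)) 10)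

-- ===== PRECONDITION & SPEC =====
def Spec_add_products (products : List (List Int)) (out : List Int) : Prop := out = add_products_alt products
instance (products : List (List Int)) (out : List Int) : Decidable (Spec_add_products products out) := by unfold Spec_add_products; infer_instance

-- ===== CLAIM (what is proved, stated in full; the proofs are below) =====
def Claim_equal_add_products : Prop := ∀ (products : List (List Int)), Dom_add_products products → Spec_add_products products (add_products products)

-- ===== LEMMAS AND PROOFS =====

-- the base-10 value of a least-significant-first list of column totals
def colValue : List Int → Int
  | [] => 0
  | t :: ts => t + 10 * colValue ts

theorem horner_eq_colValue (cs : List (List Int)) :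
    cs.reverse.foldl (fun acc col => acc * 10 + col.sum) 0
      = colValue (cs.map List.sum) := by
  rw [List.foldl_reverse]
  induction cs with
  | nil => simp [colValue]
  | cons c cs ih => simp [colValue, ih]; ring

theorem ediv_pow_succ (V : Int) (i : Nat) : V / 10 ^ (i + 1) = (V / 10) / 10 ^ i := by
  rw [pow_succ', Int.ediv_ediv_of_nonneg (by norm_num : (0:Int) ≤ 10)]

-- characterization of A's fused loop: after folding the columns from state (ans, c),
-- the digits pushed are the base-10 digits of c + colValue and the carry is the high part
theorem foldA_char (cs : List (List Int)) (ans : List Int) (c : Int) :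
    cs.foldl
      (fun (st : List Int × Int) digits =>
        let s := digits.foldl (fun acc d => acc + d) (0 + st.2)
        (PySem.Int.mod s 10 :: st.1, PySem.Int.floordiv s 10))
      (ans, c)
    = ((List.range cs.length).reverse.map
         (fun i => PySem.Int.mod (PySem.Int.floordiv (c + colValue (cs.map List.sum)) (10 ^ i)) 10)
         ++ ans,
       PySem.Int.floordiv (c + colValue (cs.map List.sum)) (10 ^ cs.length)) := by
  induction cs generalizing ans c with
  | nil =>
    simp [colValue]
  | cons d cs ih =>
    have hsum : ∀ (l : List Int) (a : Int), l.foldl (fun acc d => acc + d) a = a + l.sum := by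
      intro l a
      rw [show (fun (acc d : Int) => acc + d) = (fun acc d => acc + id d) from rfl,
        PySem.List.foldl_add]
      simp
    simp only [List.foldl_cons]
    rw [hsum, ih]
    simp only [List.map_cons, List.length_cons, List.range_succ_eq_map, List.reverse_cons,
      List.map_append, List.map_reverse, List.map_map, List.map_nil,
      List.cons_append, List.nil_append, List.append_assoc]
    have h10 : (0:Int) < 10 := by norm_num
    set s : Int := (0 + c) + d.sum with hs
    set W : Int := colValue (List.map List.sum cs) with hW
    have hV : c + colValue (d.sum :: List.map List.sum cs) = s + 10 * W := by
      simp [colValue, hs, hW]; ring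
    have hdiv : ∀ i : Nat,
        PySem.Int.floordiv (c + colValue (d.sum :: List.map List.sum cs)) (10 ^ (i + 1))
          = PySem.Int.floordiv (PySem.Int.floordiv s 10 + W) (10 ^ i) := by
      intro i
      rw [PySem.Int.floordiv_eq_ediv_of_pos (by positivity),
        PySem.Int.floordiv_eq_ediv_of_pos (by positivity),
        PySem.Int.floordiv_eq_ediv_of_pos h10, hV, ediv_pow_succ]
      congr 2
      omega
    rw [Prod.mk.injEq]
    constructor
    · congr 1
      · congr 1
        apply List.map_congr_left
        intro i _
        simp only [Function.comp_apply, Nat.succ_eq_add_one]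
        rw [hdiv i]
      · congr 1
        rw [PySem.Int.mod_eq_emod_of_pos h10, PySem.Int.mod_eq_emod_of_pos h10, pow_zero,
          PySem.Int.floordiv_eq_ediv_of_pos (show (0:Int) < 1 by norm_num), Int.ediv_one, hV]
        omega
    · exact (hdiv cs.length).symm

-- ===== VERDICT (by name: the statement is the Claim_ definition above) =====
theorem add_products_spec : Claim_equal_add_products := by
  intro products _
  unfold Spec_add_products add_products add_products_alt
  simp only []
  rw [foldA_char, horner_eq_colValue]
  simp
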